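-- pv_equiv track=rewrite | github.com/Ziqi-Gao/Information-Retrieval | src/plot_results.py | merge_fieldnames
-- ===== SOURCE A (Python) =====
-- from typing import Any, Dict, Iterable, List, Optional, Sequence, Tuple
--
-- METADATA_COLUMNS = [
--     "series_name",
--     "series_label",
--     "run_name",
--     "loss_group",
--     "memory_mode",
--     "query_mode",
-- ]
--
-- SUMMARY_COLUMNS = [
--     "version",
--     "task",
--     "loop_idx",
--     "ndcg_at_10",
--     "recall_at_10",
--     "recall_at_100",
--     "mrr_at_10",
--     "map_at_10",
--     "checkpoint_dir",
--     "raw_result_path",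
-- ]
--
-- def merge_fieldnames(fieldnames_groups: Iterable[Sequence[str]]) -> List[str]:
--     merged: List[str] = []
--     for name in METADATA_COLUMNS + SUMMARY_COLUMNS:
--         if name not in merged:
--             merged.append(name)
--     for group in fieldnames_groups:
--         for name in group:
--             if name not in merged:
--                 merged.append(name)
--     return merged
-- ===== SOURCE B (Python) =====
-- from typing import Iterable, List, Sequence
--
-- METADATA_COLUMNS = [
--     "series_name",
--     "series_label",
--     "run_name",
--     "loss_group",
--     "memory_mode",
--     "query_mode",
-- ]
--
-- SUMMARY_COLUMNS = [
--     "version",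
--     "task",
--     "loop_idx",
--     "ndcg_at_10",
--     "recall_at_10",
--     "recall_at_100",
--     "mrr_at_10",
--     "map_at_10",
--     "checkpoint_dir",
--     "raw_result_path",
-- ]
--
-- def merge_fieldnames(fieldnames_groups: Iterable[Sequence[str]]) -> List[str]:
--     # Head-extraction dedup: repeatedly take the first pending name and
--     # filter every copy of it out of the rest. No membership test, no seen
--     # structure: dedup happens by shrinking the pending stream itself.
--     pending = METADATA_COLUMNS + SUMMARY_COLUMNS
--     for group in fieldnames_groups:
--         pending = pending + list(group)
--     out: List[str] = []
--     while pending: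
--         head = pending[0]
--         out.append(head)
--         pending = [n for n in pending[1:] if n != head]
--     return out
-- ===== Notes on version B (the rewrite author's own statement) =====
-- stated objective: alternative
-- what changed: A deduplicates by testing each incoming name against the already-built output and appending; B instead runs a head-extraction (selection-style) dedup over the whole concatenated stream: take the first pending name, emit it, and filter every later copy of it out of the pending list, so no membership test or seen-structure exists at all.
import Mathlib
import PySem

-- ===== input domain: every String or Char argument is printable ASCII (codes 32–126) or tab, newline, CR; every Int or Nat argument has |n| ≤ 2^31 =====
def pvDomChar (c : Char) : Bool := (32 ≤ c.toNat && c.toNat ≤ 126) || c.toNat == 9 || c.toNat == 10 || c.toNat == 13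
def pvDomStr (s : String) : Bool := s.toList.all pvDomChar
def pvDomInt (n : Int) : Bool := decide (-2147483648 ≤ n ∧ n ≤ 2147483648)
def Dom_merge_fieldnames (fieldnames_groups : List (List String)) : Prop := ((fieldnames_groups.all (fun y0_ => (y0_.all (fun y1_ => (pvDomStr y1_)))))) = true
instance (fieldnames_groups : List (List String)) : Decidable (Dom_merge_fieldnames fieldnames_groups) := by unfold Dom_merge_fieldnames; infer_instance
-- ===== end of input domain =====

-- B replaces A's membership-test-and-append loops with a head-extraction dedup
-- over the concatenated stream (emit the first pending name, filter its copies
-- out of the rest); objective: alternative algorithm, same cost.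

def pvMetaColumns : List String :=
  ["series_name", "series_label", "run_name", "loss_group", "memory_mode", "query_mode"]

def pvSummaryColumns : List String :=
  ["version", "task", "loop_idx", "ndcg_at_10", "recall_at_10", "recall_at_100",
   "mrr_at_10", "map_at_10", "checkpoint_dir", "raw_result_path"]

-- ===== PORT A =====
-- A: two explicit loops, each appending a name iff it is not yet in `merged`
def merge_fieldnames (fieldnames_groups : List (List String)) : List String :=
  let merged : List String :=
    (pvMetaColumns ++ pvSummaryColumns).foldl
      (fun acc name => if name ∈ acc then acc else acc ++ [name]) []
  fieldnames_groups.foldl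
    (fun acc group =>
      group.foldl (fun acc name => if name ∈ acc then acc else acc ++ [name]) acc)
    merged

-- ===== PORT B =====
-- B's while loop: append the head to `out`, filter it out of the rest of `pending`.
-- `fuel` only makes the recursion structural; fuel = pending.length always suffices
-- since the filtered rest is never longer than `rest`.
def pvHeadLoop : Nat → List String → List String → List String
  | _, [], out => out
  | 0, _ :: _, out => out
  | fuel + 1, head :: rest, out =>
      pvHeadLoop fuel (rest.filter (fun n => n ≠ head)) (out ++ [head])

def merge_fieldnames_alt (fieldnames_groups : List (List String)) : List String :=
  let pending :=
    fieldnames_groups.foldl (fun acc group => acc ++ group)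
      (pvMetaColumns ++ pvSummaryColumns)
  pvHeadLoop pending.length pending []

-- ===== PRECONDITION & SPEC =====
def Spec_merge_fieldnames (fieldnames_groups : List (List String)) (out : List String) : Prop := out = merge_fieldnames_alt fieldnames_groups
instance (fieldnames_groups : List (List String)) (out : List String) : Decidable (Spec_merge_fieldnames fieldnames_groups out) := by unfold Spec_merge_fieldnames; infer_instance

-- ===== CLAIM (what is proved, stated in full; the proofs are below) =====
def Claim_equal_merge_fieldnames : Prop := ∀ (fieldnames_groups : List (List String)), Dom_merge_fieldnames fieldnames_groups → Spec_merge_fieldnames fieldnames_groups (merge_fieldnames fieldnames_groups)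

-- ===== LEMMAS AND PROOFS =====

-- A's membership-append step is exactly PySem.Set.add
theorem pv_step_eq_add (acc : List String) (name : String) :
    (if name ∈ acc then acc else acc ++ [name]) = PySem.Set.add acc name := by
  simp [PySem.Set.add]

-- A's nested loops over groups are the fold over the flattened stream
theorem pv_groups_fold (gs : List (List String)) (acc : List String) :
    gs.foldl (fun acc group => group.foldl PySem.Set.add acc) acc
      = gs.flatten.foldl PySem.Set.add acc := by
  induction gs generalizing acc with
  | nil => rfl
  | cons g gs ih =>
    simp only [List.foldl_cons, List.flatten_cons, List.foldl_append]
    exact ih _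

-- B's stream building is concatenation of the flattened groups
theorem pv_stream_eq (gs : List (List String)) (acc : List String) :
    gs.foldl (fun acc group => acc ++ group) acc = acc ++ gs.flatten := by
  induction gs generalizing acc with
  | nil => simp
  | cons g gs ih => simp [List.foldl_cons, ih, List.append_assoc]

-- key invariant: membership-append folding = head-extraction on the unseen part
theorem pv_fold_eq_headLoop (l acc : List String) (f : Nat)
    (hf : (l.filter (fun x => x ∉ acc)).length ≤ f) :
    l.foldl PySem.Set.add acc
      = pvHeadLoop f (l.filter (fun x => x ∉ acc)) acc := by
  induction hl : l.length using Nat.strong_induction_on generalizing l acc f with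
  | _ n ih =>
    match l with
    | [] =>
      cases f <;> simp [pvHeadLoop]
    | x :: xs =>
      by_cases hx : x ∈ acc
      · have h1 : (x :: xs).filter (fun y => decide (y ∉ acc))
            = xs.filter (fun y => decide (y ∉ acc)) := by
          simp [hx]
        rw [h1, List.foldl_cons]
        have hacc : PySem.Set.add acc x = acc := by simp [PySem.Set.add, hx]
        rw [hacc]
        exact ih xs.length (by simp [← hl]) xs acc f (by rw [h1] at hf; exact hf) rfl
      · have h1 : (x :: xs).filter (fun y => decide (y ∉ acc))
            = x :: xs.filter (fun y => decide (y ∉ acc)) := by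
          simp [hx]
        have hfilter :
            (xs.filter (fun y => decide (y ∉ acc))).filter (fun n => decide (n ≠ x))
              = xs.filter (fun y => decide (y ∉ acc ++ [x])) := by
          rw [List.filter_filter]
          apply List.filter_congr
          intro a _
          by_cases hc1 : a ∈ acc <;> by_cases hc2 : a = x <;> simp [hc1, hc2]
        rw [h1] at hf
        match f with
        | 0 => simp at hf
        | f + 1 =>
          rw [h1, pvHeadLoop, List.foldl_cons]
          have hadd : PySem.Set.add acc x = acc ++ [x] := by simp [PySem.Set.add, hx]
          rw [hadd, hfilter]
          have hb : (xs.filter (fun y => decide (y ∉ acc ++ [x]))).length ≤ f := by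
            rw [← hfilter]
            exact le_trans (List.length_filter_le _ _) (by simpa using Nat.lt_succ_iff.mp (by simpa using hf))
          exact ih xs.length (by simp [← hl]) xs (acc ++ [x]) f hb rfl

-- ===== VERDICT (by name: the statement is the Claim_ definition above) =====
theorem merge_fieldnames_spec : Claim_equal_merge_fieldnames := by
  intro groups _
  show merge_fieldnames groups = merge_fieldnames_alt groups
  unfold merge_fieldnames merge_fieldnames_alt
  simp only [pv_step_eq_add, pv_groups_fold, pv_stream_eq]
  have hid : List.filter (fun (_ : String) => true) = id := funext fun l => by simp
  rw [← List.foldl_append,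
    pv_fold_eq_headLoop (pvMetaColumns ++ pvSummaryColumns ++ groups.flatten) []
      (pvMetaColumns ++ pvSummaryColumns ++ groups.flatten).length (by simp [hid])]
  simp [hid]
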